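-- pv_equiv track=rewrite | github.com/martinalvarado4/reposi | ejemplos/foryif.py | cuanto
-- ===== SOURCE A (Python) =====
-- import string
--
-- def cuanto(key , encripted):
--     largo=len(string.ascii_lowercase)
--     listakey=[]
--     k=list(key)
--     e=list(encripted)
--     i=0
--     while len(listakey)<len(encripted):
--         b=len(encripted)//len(k)
--         if i < b:
--             for m in range(0,len(k)):
--                 listakey.append(k[m])
--             i=i+1
--         else :
--             c=len(encripted)%len(k)
--             for j in range(0,c):
--                 listakey.append(k[j])
--     return listakey
-- ===== SOURCE B (Python) =====
-- def cuanto(key, encripted):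
--     k = list(key)
--     n = len(encripted)
--     return [k[i % len(k)] for i in range(n)]
-- ===== Notes on version B (the rewrite author's own statement) =====
-- stated objective: simpler
-- what changed: Replaces A's while loop that appends whole-key blocks n//len(key) times and then a remainder prefix with a single per-output-index pass mapping index i to key[i % len(key)].
import Mathlib
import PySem

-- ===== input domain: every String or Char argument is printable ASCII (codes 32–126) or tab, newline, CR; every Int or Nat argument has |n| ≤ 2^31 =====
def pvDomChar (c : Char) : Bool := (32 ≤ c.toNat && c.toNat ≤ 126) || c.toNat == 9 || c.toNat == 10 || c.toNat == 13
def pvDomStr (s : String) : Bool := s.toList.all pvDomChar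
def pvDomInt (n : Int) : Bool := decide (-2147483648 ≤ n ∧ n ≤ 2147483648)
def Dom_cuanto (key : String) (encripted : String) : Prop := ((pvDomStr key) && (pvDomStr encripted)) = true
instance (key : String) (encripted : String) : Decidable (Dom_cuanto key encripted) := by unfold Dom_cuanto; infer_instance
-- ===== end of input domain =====

-- B replaces A's block-appending while loop by one per-index map i ↦ key[i % len(key)] (objective: simpler).

-- ===== PORT A =====
-- A's while loop, step for step: while len(listakey) < n, either append the whole
-- key (the inner for over range(len(k))) when i < n//len(k), bumping i, or append
-- the first n%len(k) key characters (the for over range(c)).  `fuel` only makes the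
-- loop total in Lean (n+2 exceeds the number of iterations A's loop performs); it is
-- not a branch of the algorithm.  Nat `/`/`%` match Python `//`/`%` here because both
-- operands are lengths (nonnegative); when k = [] Python raises ZeroDivisionError
-- (excluded by Pre_cuanto below).
def cuantoLoop (k : List String) (n : Nat) : Nat → List String → Nat → List String
  | 0, acc, _ => acc
  | fuel + 1, acc, i =>
    if acc.length < n then
      if i < n / k.length then
        cuantoLoop k n fuel (acc ++ k) (i + 1)
      else
        cuantoLoop k n fuel (acc ++ k.take (n % k.length)) i
    else acc

def cuanto (key : String) (encripted : String) : List String :=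
  let k := key.toList.map (fun c => String.ofList [c])   -- k = list(key): one-char strings
  let n := encripted.toList.length                   -- len(encripted)
  cuantoLoop k n (n + 2) [] 0

-- ===== PORT B =====
-- Source B: k = list(key); n = len(encripted); [k[i % len(k)] for i in range(n)].
-- getD's "" default is never reached inside Pre_cuanto (Python raises there: i % 0).
def cuanto_alt (key : String) (encripted : String) : List String :=
  let k := key.toList.map (fun c => String.ofList [c])
  let n := encripted.toList.length
  (List.range n).map (fun i => k.getD (i % k.length) "")

-- ===== PRECONDITION & SPEC =====
-- A raises ZeroDivisionError when key = "" and encripted ≠ "" (len(e)//len(k)); Pre_ excludes exactly that.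
def Pre_cuanto (key : String) (encripted : String) : Prop := encripted = "" ∨ key ≠ ""
instance (key : String) (encripted : String) : Decidable (Pre_cuanto key encripted) := by unfold Pre_cuanto; infer_instance
def pvWitness_cuanto : String × String := ("abc", "hello world")

def Spec_cuanto (key : String) (encripted : String) (out : List String) : Prop := out = cuanto_alt key encripted
instance (key : String) (encripted : String) (out : List String) : Decidable (Spec_cuanto key encripted out) := by unfold Spec_cuanto; infer_instance

-- ===== CLAIM (what is proved, stated in full; the proofs are below) =====
def Claim_equal_cuanto : Prop := ∀ (key : String) (encripted : String), Dom_cuanto key encripted → Pre_cuanto key encripted → Spec_cuanto key encripted (cuanto key encripted)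

-- ===== LEMMAS AND PROOFS =====

-- The loop returns acc as soon as acc has reached length n.
theorem cuantoLoop_done (k : List String) (n fuel : Nat) (acc : List String) (i : Nat)
    (h : ¬ acc.length < n) (hf : 0 < fuel) : cuantoLoop k n fuel acc i = acc := by
  cases fuel with
  | zero => omega
  | succ m => simp [cuantoLoop, h]

-- One segment of the cyclic target: indices [L, L+c) with L a multiple of |k| and c ≤ |k|
-- map to the first c elements of k.
theorem range_map_seg (k : List String) (L c : Nat)
    (hL : L % k.length = 0) (hc : c ≤ k.length) :
    (List.range (L + c)).map (fun i => k.getD (i % k.length) "")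
      = (List.range L).map (fun i => k.getD (i % k.length) "") ++ k.take c := by
  rw [List.range_add, List.map_append, List.map_map]
  congr 1
  apply List.ext_getElem
  · simp [hc]
  · intro j h1 h2
    simp only [List.getElem_map, List.getElem_range, Function.comp_apply, List.getElem_take]
    have hj : j < c := by simpa using h1
    have hmod : (L + j) % k.length = j := by
      obtain ⟨q, hq⟩ := Nat.dvd_of_mod_eq_zero hL
      rw [hq, Nat.mul_add_mod, Nat.mod_eq_of_lt (by omega)]
    rw [hmod, List.getD_eq_getElem]

-- Loop invariant: starting from the first i·|k| characters of the cyclic target with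
-- enough fuel, the loop produces the whole target.
theorem cuantoLoop_eq (k : List String) (hk : 0 < k.length) (n : Nat) :
    ∀ fuel i, i * k.length ≤ n → n / k.length - i + 2 ≤ fuel →
      cuantoLoop k n fuel ((List.range (i * k.length)).map (fun j => k.getD (j % k.length) "")) i
        = (List.range n).map (fun j => k.getD (j % k.length) "") := by
  intro fuel
  induction fuel with
  | zero => intro i _ h; omega
  | succ f ih =>
    intro i hle hf
    have hlen : ((List.range (i * k.length)).map (fun j => k.getD (j % k.length) "")).length = i * k.length := by simp
    by_cases hlt : i * k.length < n
    · rw [cuantoLoop]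
      rw [hlen]
      simp only [hlt, if_true]
      have hdm : k.length * (n / k.length) + n % k.length = n := Nat.div_add_mod n k.length
      have hmlt : n % k.length < k.length := Nat.mod_lt _ hk
      by_cases hib : i < n / k.length
      · simp only [hib, if_true]
        have hseg := range_map_seg k (i * k.length) k.length (Nat.mul_mod_left i k.length) (le_refl _)
        rw [List.take_length] at hseg
        rw [← hseg]
        have : i * k.length + k.length = (i + 1) * k.length := by ring
        rw [this]
        apply ih
        · calc (i + 1) * k.length ≤ (n / k.length) * k.length := Nat.mul_le_mul_right _ (by omega)
            _ ≤ n := Nat.div_mul_le_self n k.length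
        · omega
      · simp only [hib, if_false]
        -- here i = n / k.length
        have hieq : i = n / k.length := by
          by_contra hne
          have h1 : n / k.length + 1 ≤ i := by omega
          have h2 : (n / k.length + 1) * k.length ≤ i * k.length := Nat.mul_le_mul_right _ h1
          have h3 : (n / k.length + 1) * k.length = (n / k.length) * k.length + k.length := by ring
          have h4 : (n / k.length) * k.length = k.length * (n / k.length) := Nat.mul_comm _ _
          omega
        have hseg := range_map_seg k (i * k.length) (n % k.length)
          (Nat.mul_mod_left i k.length) (le_of_lt hmlt)
        rw [← hseg]
        have hsum : i * k.length + n % k.length = n := by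
          rw [hieq, Nat.mul_comm]; exact hdm
        rw [hsum]
        apply cuantoLoop_done
        · simp
        · omega
    · rw [cuantoLoop, hlen]
      simp only [hlt, if_false]
      have : i * k.length = n := by omega
      rw [this]

-- ===== VERDICT (by name: the statement is the Claim_ definition above) =====
theorem cuanto_spec : Claim_equal_cuanto := by
  intro key encripted _ hpre
  show cuanto key encripted = cuanto_alt key encripted
  simp only [cuanto, cuanto_alt]
  rcases Nat.eq_zero_or_pos encripted.toList.length with hn | hn
  · rw [hn, cuantoLoop_done _ _ _ _ _ (by simp) (by omega)]
    simp
  · have hkey : key ≠ "" := by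
      rcases hpre with h | h
      · subst h; simp at hn
      · exact h
    have hk : 0 < (key.toList.map (fun c => String.ofList [c])).length := by
      rw [List.length_map]
      rcases hkl : key.toList with _ | ⟨a, l⟩
      · exact absurd (String.toList_eq_nil_iff.mp hkl) hkey
      · simp
    have hdiv : encripted.toList.length / (key.toList.map (fun c => String.ofList [c])).length
        ≤ encripted.toList.length := Nat.div_le_self _ _
    have := cuantoLoop_eq (key.toList.map (fun c => String.ofList [c])) hk
      encripted.toList.length (encripted.toList.length + 2) 0 (by simp) (by omega)
    simpa using this
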